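-- pv_equiv track=rewrite | github.com/salockhart/adventofcode | adventofcode-python/adventofcode2019/day/04/04.py | meetsStrictCriteria
-- ===== SOURCE A (Python) =====
-- def meetsStrictCriteria(parts):
--     foundDouble = False
--
--     for idx, x in enumerate(parts):
--         if min(parts[idx:]) < x:
--             return False
--
--         if parts.count(x) == 2:
--             foundDouble = True
--
--     return foundDouble
-- ===== SOURCE B (Python) =====
-- def meetsStrictCriteria(parts):
--     if not parts:
--         return False
--     prev = parts[0]
--     run = 1
--     foundDouble = False
--     for x in parts[1:]:
--         if x < prev:
--             return False
--         if x == prev: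
--             run += 1
--         else:
--             if run == 2:
--                 foundDouble = True
--             prev = x
--             run = 1
--     return foundDouble or run == 2
-- ===== Notes on version B (the rewrite author's own statement) =====
-- stated objective: faster
-- what changed: Replaced the per-index min-of-suffix and whole-list count scans (quadratic) by one linear pass tracking the previous element and the length of the current run of equal values, closing each run with a length-exactly-2 test.
import Mathlib
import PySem

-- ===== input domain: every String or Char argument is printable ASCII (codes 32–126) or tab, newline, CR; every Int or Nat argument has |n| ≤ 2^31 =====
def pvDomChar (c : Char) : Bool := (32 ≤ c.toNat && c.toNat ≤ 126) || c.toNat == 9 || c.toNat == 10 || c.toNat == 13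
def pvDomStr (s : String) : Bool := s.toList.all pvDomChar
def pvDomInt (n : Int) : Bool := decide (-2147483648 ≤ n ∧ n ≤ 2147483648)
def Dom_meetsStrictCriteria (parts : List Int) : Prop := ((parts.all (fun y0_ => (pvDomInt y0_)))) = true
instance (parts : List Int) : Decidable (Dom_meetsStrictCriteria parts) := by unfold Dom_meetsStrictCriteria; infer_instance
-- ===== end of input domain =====

-- B replaces A's per-index min-of-suffix and whole-list count scans by one linear pass
-- over runs of equal values (objective: faster).

-- ===== PORT A =====
-- loop body of A over `enumerate(parts)`; the `none` branch of min? is unreachable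
-- (parts[idx:] always contains parts[idx]), matching Python's min that never sees [] here.
def goA (parts : List Int) : List (Int × Int) → Bool → Bool
  | [], foundDouble => foundDouble
  | (idx, x) :: rest, foundDouble =>
    if (PySem.List.min? (PySem.List.slice parts (some idx) none) (fun y => y)).any
        (fun m => decide (m < x)) then
      false
    else
      goA parts rest (if PySem.List.count parts x == 2 then true else foundDouble)

def meetsStrictCriteria (parts : List Int) : Bool :=
  goA parts (PySem.List.enumerate parts 0) false

-- ===== PORT B =====
-- loop body of B: prev = previous element, run = length of the current run of equal values.
def goB : List Int → Int → Nat → Bool → Bool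
  | [], _, run, foundDouble => foundDouble || (run == 2)
  | x :: rest, prev, run, foundDouble =>
    if x < prev then false
    else if x == prev then goB rest prev (run + 1) foundDouble
    else goB rest x 1 (foundDouble || (run == 2))

def meetsStrictCriteria_alt (parts : List Int) : Bool :=
  match parts with
  | [] => false
  | x :: rest => goB rest x 1 false

-- ===== PRECONDITION & SPEC =====
def Spec_meetsStrictCriteria (parts : List Int) (out : Bool) : Prop := out = meetsStrictCriteria_alt parts
instance (parts : List Int) (out : Bool) : Decidable (Spec_meetsStrictCriteria parts out) := by unfold Spec_meetsStrictCriteria; infer_instance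

-- ===== CLAIM (what is proved, stated in full; the proofs are below) =====
def Claim_equal_meetsStrictCriteria : Prop := ∀ (parts : List Int), Dom_meetsStrictCriteria parts → Spec_meetsStrictCriteria parts (meetsStrictCriteria parts)

-- ===== LEMMAS AND PROOFS =====

-- common reference value: some element occurs exactly twice
def hasTwo (l : List Int) : Bool := l.any (fun y => l.count y == 2)

lemma hasTwo_replicate (n : Nat) (v : Int) (h : 1 ≤ n) :
    hasTwo (List.replicate n v) = (n == 2) := by
  have hn : n ≠ 0 := by omega
  by_cases h2 : n = 2 <;> simp [hasTwo, List.any_eq, List.mem_replicate, hn, h2]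

lemma hasTwo_replicate_append (n : Nat) (v : Int) (l : List Int) (h : 1 ≤ n)
    (hv : v ∉ l) :
    hasTwo (List.replicate n v ++ l) = ((n == 2) || hasTwo l) := by
  have hn : n ≠ 0 := by omega
  have hcnt : ∀ y ∈ l, List.count y (List.replicate n v ++ l) = List.count y l := by
    intro y hy
    have : v ≠ y := fun e => hv (e ▸ hy)
    simp [List.count_append, List.count_replicate, this]
  rw [Bool.eq_iff_iff]
  simp only [hasTwo, List.any_eq_true, List.mem_append, List.mem_replicate,
    Bool.or_eq_true, beq_iff_eq]
  constructor
  · rintro ⟨y, hy | hy, hc⟩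
    · left
      rcases hy with ⟨-, rfl⟩
      rw [List.count_append, List.count_replicate,
        List.count_eq_zero_of_not_mem hv] at hc
      simpa using hc
    · right
      exact ⟨y, hy, by rw [← hcnt y hy]; exact hc⟩
  · rintro (h2 | ⟨y, hy, hc⟩)
    · refine ⟨v, Or.inl ⟨hn, rfl⟩, ?_⟩
      rw [List.count_append, List.count_replicate,
        List.count_eq_zero_of_not_mem hv]
      simpa using h2
    · exact ⟨y, Or.inr hy, by rw [hcnt y hy]; exact hc⟩

-- B's loop, characterised
lemma goB_spec (rest : List Int) : ∀ (prev : Int) (run : Nat) (fd : Bool), 1 ≤ run →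
    goB rest prev run fd =
      if List.IsChain (· ≤ ·) (prev :: rest)
      then fd || hasTwo (List.replicate run prev ++ rest)
      else false := by
  induction rest with
  | nil =>
    intro prev run fd h
    simp [goB, hasTwo_replicate run prev h]
  | cons x rest ih =>
    intro prev run fd h
    by_cases hlt : x < prev
    · have : ¬ List.IsChain (· ≤ ·) (prev :: x :: rest) := by
        intro hc
        exact absurd (List.IsChain.rel_head hc) (by omega)
      simp [goB, hlt, this]
    · by_cases heq : x = prev
      · subst heq
        have hrep : List.replicate run x ++ x :: rest = List.replicate (run + 1) x ++ rest := by
          rw [List.replicate_succ', List.append_assoc]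
          rfl
        have hch : List.IsChain (· ≤ ·) (x :: x :: rest) ↔ List.IsChain (· ≤ ·) (x :: rest) := by
          rw [List.isChain_cons_cons]
          simp
        simp only [goB, if_neg hlt, BEq.rfl, if_true]
        rw [ih x (run + 1) fd (by omega), hrep]
        simp only [hch]
      · have hgt : prev < x := by
          rcases lt_trichotomy x prev with h1 | h1 | h1
          · exact absurd h1 hlt
          · exact absurd h1 heq
          · exact h1
        have hbe : (x == prev) = false := by simp [heq]
        simp only [goB, if_neg hlt, hbe, Bool.false_eq_true, if_false]
        rw [ih x 1 (fd || (run == 2)) (by omega)]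
        by_cases hc : List.IsChain (· ≤ ·) (x :: rest)
        · have hch2 : List.IsChain (· ≤ ·) (prev :: x :: rest) :=
            List.isChain_cons_cons.mpr ⟨le_of_lt hgt, hc⟩
          rw [if_pos hc, if_pos hch2]
          have hnm : prev ∉ x :: rest := by
            intro hm
            have hp : List.Pairwise (· ≤ ·) (x :: rest) := List.isChain_iff_pairwise.mp hc
            rcases List.mem_cons.mp hm with rfl | hm2
            · omega
            · have := (List.pairwise_cons.mp hp).1 prev hm2
              omega
          rw [hasTwo_replicate_append run prev (x :: rest) h hnm]
          simp only [List.replicate_one, List.singleton_append]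
          cases fd <;> cases (run == 2) <;> simp
        · have : ¬ List.IsChain (· ≤ ·) (prev :: x :: rest) :=
            fun hh => hc (List.isChain_cons_cons.mp hh).2
          rw [if_neg hc, if_neg this]

lemma alt_eq (parts : List Int) :
    meetsStrictCriteria_alt parts =
      if List.IsChain (· ≤ ·) parts then hasTwo parts else false := by
  cases parts with
  | nil => simp [meetsStrictCriteria_alt, hasTwo]
  | cons x rest =>
    simp only [meetsStrictCriteria_alt]
    rw [goB_spec rest x 1 false le_rfl]
    simp

-- A's loop when no element fires the early return
lemma goA_no_fire (parts : List Int) (l : List (Int × Int)) (fd : Bool)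
    (h : ∀ p ∈ l, ((PySem.List.min? (PySem.List.slice parts (some p.1) none) (fun y => y)).any
        (fun m => decide (m < p.2))) = false) :
    goA parts l fd = (fd || l.any (fun p => PySem.List.count parts p.2 == 2)) := by
  induction l generalizing fd with
  | nil => simp [goA]
  | cons p rest ih =>
    obtain ⟨idx, x⟩ := p
    have h0 := h (idx, x) (List.mem_cons_self)
    simp only [goA, h0, Bool.false_eq_true, if_false]
    rw [ih _ (fun q hq => h q (List.mem_cons_of_mem _ hq))]
    simp only [List.any_cons]
    generalize (rest.any fun p => PySem.List.count parts p.2 == 2) = r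
    cases (PySem.List.count parts x == 2) <;> cases fd <;> cases r <;> simp

-- A's loop returns False as soon as some element of the worklist fires
lemma goA_fire (parts : List Int) (l : List (Int × Int)) (fd : Bool)
    (h : ∃ p ∈ l, ((PySem.List.min? (PySem.List.slice parts (some p.1) none) (fun y => y)).any
        (fun m => decide (m < p.2))) = true) :
    goA parts l fd = false := by
  induction l generalizing fd with
  | nil => simp at h
  | cons p rest ih =>
    obtain ⟨idx, x⟩ := p
    by_cases hp : ((PySem.List.min? (PySem.List.slice parts (some idx) none) (fun y => y)).any
        (fun m => decide (m < x))) = true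
    · simp [goA, hp]
    · rcases h with ⟨q, hq, hfire⟩
      rcases List.mem_cons.mp hq with rfl | hq'
      · exact absurd hfire hp
      · simp only [goA, hp, Bool.false_eq_true, if_false]
        exact ih _ ⟨q, hq', hfire⟩

lemma a_sorted (parts : List Int) (hs : List.IsChain (· ≤ ·) parts) :
    meetsStrictCriteria parts = hasTwo parts := by
  have hpw : List.Pairwise (· ≤ ·) parts := List.isChain_iff_pairwise.mp hs
  rw [meetsStrictCriteria, goA_no_fire]
  · -- the remaining fold equals hasTwo
    simp only [Bool.false_or]
    have heq0 : (fun p : Int × Int => (PySem.List.count parts p.2 == 2))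
        = ((fun y => PySem.List.count parts y == 2) ∘ (fun p : Int × Int => p.2)) := rfl
    rw [heq0, ← List.any_map, PySem.List.map_snd_enumerate, hasTwo]
    exact List.any_congr rfl (fun y => by rw [PySem.List.count_eq])
  · intro p hp
    rcases (PySem.List.mem_enumerate_iff parts 0 p).mp hp with ⟨k, hk, rfl⟩
    simp only [zero_add]
    rw [PySem.List.slice_from_natCast]
    cases hmin : PySem.List.min? (parts.drop k) (fun y => y) with
    | none => simp
    | some m =>
      have hmem : m ∈ parts.drop k := PySem.List.min?_mem hmin
      have hdk : parts.drop k = parts[k] :: parts.drop (k + 1) := by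
        exact (List.drop_eq_getElem_cons hk)
      have hle : parts[k] ≤ m := by
        rw [hdk] at hmem
        rcases List.mem_cons.mp hmem with rfl | hm
        · exact le_rfl
        · have hpd : List.Pairwise (· ≤ ·) (parts.drop k) := hpw.drop
          rw [hdk] at hpd
          exact (List.pairwise_cons.mp hpd).1 m hm
      simp
      omega

lemma a_unsorted (parts : List Int) (hs : ¬ List.IsChain (· ≤ ·) parts) :
    meetsStrictCriteria parts = false := by
  rw [List.isChain_iff_getElem] at hs
  simp only [not_forall] at hs
  rcases hs with ⟨k, hk, hlt⟩
  apply goA_fire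
  refine ⟨((k : Int), parts[k]), ?_, ?_⟩
  · rw [PySem.List.mem_enumerate_iff]
    exact ⟨k, by omega, by simp⟩
  · simp only
    rw [PySem.List.slice_from_natCast]
    cases hmin : PySem.List.min? (parts.drop k) (fun y => y) with
    | none =>
      rw [PySem.List.min?_eq_none_iff] at hmin
      have : parts.length - k = 0 := by
        have := congrArg List.length hmin
        simpa using this
      omega
    | some m =>
      have hmem : parts[k+1] ∈ parts.drop k := by
        have h1 : 1 < (parts.drop k).length := by simp; omega
        have : (parts.drop k)[1] = parts[k+1] := by
          rw [List.getElem_drop]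
        rw [← this]
        exact List.getElem_mem h1
      have := PySem.List.min?_isMin hmin parts[k+1] hmem
      simp
      omega

-- ===== VERDICT (by name: the statement is the Claim_ definition above) =====
theorem meetsStrictCriteria_spec : Claim_equal_meetsStrictCriteria := by
  intro parts _
  show meetsStrictCriteria parts = meetsStrictCriteria_alt parts
  rw [alt_eq]
  by_cases hs : List.IsChain (· ≤ ·) parts
  · rw [if_pos hs, a_sorted parts hs]
  · rw [if_neg hs, a_unsorted parts hs]
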